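-- pv_equiv track=rewrite | github.com/streppneumo/isp | biocyc/parsing.py | consolidate_attributes
-- ===== SOURCE A (Python) =====
-- def consolidate_attributes(records):
--     def consolidate(lines):
--         sets = []
--         attrs = []
--         for i in range(len(lines)):
--             if lines[i].startswith('^'):
--                 attrs.append((lines[i][1:], []))
--             else:
--                 attrs = []
--                 sets.append((lines[i], attrs))
--         return sets
--
--     return [consolidate(record) for record in records]
-- ===== SOURCE B (Python) =====
-- def consolidate_attributes(records):
--     def consolidate(lines):
--         n = len(lines)
--         anchors = [i for i in range(n) if not lines[i].startswith('^')]
--         ends = anchors[1:] + [n]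
--         return [(lines[i], [(line[1:], []) for line in lines[i + 1:j]])
--                 for i, j in zip(anchors, ends)]
--
--     return [consolidate(record) for record in records]
-- ===== Notes on version B (the rewrite author's own statement) =====
-- stated objective: alternative
-- what changed: A makes one stateful pass that appends caret attributes into a mutable attrs list aliased with sets[-1]; B works in two phases: it first collects the indices of all non-caret anchor lines, then slices out each anchor's following caret segment with lines[i+1:j] over consecutive anchor index pairs.
import Mathlib
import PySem

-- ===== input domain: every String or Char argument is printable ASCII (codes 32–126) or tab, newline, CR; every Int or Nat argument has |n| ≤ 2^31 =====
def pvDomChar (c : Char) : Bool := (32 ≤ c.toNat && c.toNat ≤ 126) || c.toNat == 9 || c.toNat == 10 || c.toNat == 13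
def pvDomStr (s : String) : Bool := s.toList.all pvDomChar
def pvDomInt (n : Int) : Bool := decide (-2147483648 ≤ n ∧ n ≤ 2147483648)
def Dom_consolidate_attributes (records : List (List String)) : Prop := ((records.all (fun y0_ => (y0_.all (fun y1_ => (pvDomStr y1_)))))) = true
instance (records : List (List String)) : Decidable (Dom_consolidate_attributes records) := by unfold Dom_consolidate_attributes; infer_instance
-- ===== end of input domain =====

-- B replaces A's single stateful pass (a mutable attrs list aliased with sets[-1]) by a
-- two-phase shape: first collect the anchor indices, then slice out each segment (objective: alternative).

-- ===== PORT A =====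
-- Python's `attrs` list is aliased with the second component of sets[-1]; the port keeps that
-- live last entry as an `Option` component of the state (none = the initial, unlinked attrs),
-- and `sets` is `done ++ cur.toList`.
def consolidateA_step (st : List (String × (List (String × List Int))) × Option (String × (List (String × List Int)))) (line : String) :
    List (String × (List (String × List Int))) × Option (String × (List (String × List Int))) :=
  if PySem.Str.startswith line "^" then
    (st.1, st.2.map (fun p => (p.1, p.2 ++ [(PySem.Str.slice line (some 1) none, ([] : List Int))])))
  else
    (st.1 ++ st.2.toList, some (line, []))

def consolidate_attributes (records : List (List String)) : List (List (String × (List (String × List Int)))) :=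
  records.map (fun lines =>
    let st := (PySem.List.pyRange 0 (lines.length : Int) 1).foldl
      (fun st i => consolidateA_step st (PySem.List.pyGetD lines i "")) ([], none)
    st.1 ++ st.2.toList)

-- ===== PORT B =====
def consolidate_attributes_alt (records : List (List String)) : List (List (String × (List (String × List Int)))) :=
  records.map (fun lines =>
    let n : Int := (lines.length : Int)
    let anchors : List Int := (PySem.List.pyRange 0 n 1).filter
      (fun i => !(PySem.Str.startswith (PySem.List.pyGetD lines i "") "^"))
    let ends : List Int := PySem.List.slice anchors (some 1) none ++ [n]
    (anchors.zip ends).map (fun ij =>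
      (PySem.List.pyGetD lines ij.1 "",
       (PySem.List.slice lines (some (ij.1 + 1)) (some ij.2)).map
         (fun line => (PySem.Str.slice line (some 1) none, ([] : List Int))))))

-- ===== PRECONDITION & SPEC =====
def Spec_consolidate_attributes (records : List (List String)) (out : List (List (String × (List (String × List Int))))) : Prop := out = consolidate_attributes_alt records
instance (records : List (List String)) (out : List (List (String × (List (String × List Int))))) : Decidable (Spec_consolidate_attributes records out) := by unfold Spec_consolidate_attributes; infer_instance

-- ===== CLAIM (what is proved, stated in full; the proofs are below) =====
def Claim_equal_consolidate_attributes : Prop := ∀ (records : List (List String)), Dom_consolidate_attributes records → Spec_consolidate_attributes records (consolidate_attributes records)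

-- ===== LEMMAS AND PROOFS =====

-- reference grouping: skip leading caret lines; an anchor takes the following caret run as attrs
def pvCaret (line : String) : Bool := PySem.Str.startswith line "^"

def pvAttr (line : String) : String × List Int := (PySem.Str.slice line (some 1) none, [])

def pvGrp : List String → List (String × (List (String × List Int)))
  | [] => []
  | s :: r => if pvCaret s then pvGrp r else (s, (r.takeWhile pvCaret).map pvAttr) :: pvGrp r

-- ----- A side: the stateful fold computes pvGrp -----
theorem pvA_go (lines : List String) :
    ∀ (done : List (String × (List (String × List Int)))) (cur : Option (String × (List (String × List Int)))),
    (lines.foldl consolidateA_step (done, cur)).1 ++ (lines.foldl consolidateA_step (done, cur)).2.toList =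
      done ++ (match cur with
        | none => pvGrp lines
        | some p => (p.1, p.2 ++ (lines.takeWhile pvCaret).map pvAttr) :: pvGrp lines) := by
  induction lines with
  | nil => intro done cur; cases cur <;> simp [pvGrp]
  | cons s r ih =>
    intro done cur
    by_cases h : PySem.Chars.startswith s.toList ['^'] = true
    · cases cur with
      | none =>
        have hstep : consolidateA_step (done, none) s = (done, none) := by
          simp [consolidateA_step, h]
        rw [List.foldl_cons, hstep]
        simpa [pvGrp, pvCaret, h] using ih done none
      | some p =>
        have hstep : consolidateA_step (done, some p) s =
            (done, some (p.1, p.2 ++ [pvAttr s])) := by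
          simp [consolidateA_step, pvAttr, h]
        rw [List.foldl_cons, hstep]
        have := ih done (some (p.1, p.2 ++ [pvAttr s]))
        simp only [this]
        simp [pvGrp, pvCaret, h]
    · have hf : PySem.Chars.startswith s.toList ['^'] = false := by simpa using h
      cases cur with
      | none =>
        have hstep : consolidateA_step (done, none) s = (done, some (s, [])) := by
          simp [consolidateA_step, hf]
        rw [List.foldl_cons, hstep]
        have := ih done (some (s, []))
        simp only [this]
        simp [pvGrp, pvCaret, hf]
      | some p =>
        have hstep : consolidateA_step (done, some p) s = (done ++ [p], some (s, [])) := by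
          simp [consolidateA_step, hf]
        rw [List.foldl_cons, hstep]
        have := ih (done ++ [p]) (some (s, []))
        simp only [this]
        simp [pvGrp, pvCaret, hf]

theorem pvA_record (lines : List String) :
    (let st := (PySem.List.pyRange 0 (lines.length : Int) 1).foldl
        (fun st i => consolidateA_step st (PySem.List.pyGetD lines i "")) ([], none)
     st.1 ++ st.2.toList) = pvGrp lines := by
  have hA := PySem.List.foldl_pyRange_zero_pyGetD' lines "" consolidateA_step
    (([], none) : List (String × (List (String × List Int))) × Option (String × (List (String × List Int))))
  simp only [hA]
  simpa using pvA_go lines [] none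

-- ----- B side: the anchor-index/segment-slice phases compute pvGrp -----
-- anchor indices, structurally
def pvAnch : List String → List Nat
  | [] => []
  | s :: r => if pvCaret s then (pvAnch r).map (· + 1) else 0 :: (pvAnch r).map (· + 1)

-- segment extracted for the anchor pair (i, j)
def pvF (lines : List String) (ij : Nat × Nat) : String × List (String × List Int) :=
  (lines.getD ij.1 "", ((lines.drop (ij.1 + 1)).take (ij.2 - (ij.1 + 1))).map pvAttr)

theorem pvAnch_nil_takeWhile (r : List String) (h : pvAnch r = []) :
    r.takeWhile pvCaret = r := by
  induction r with
  | nil => rfl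
  | cons s t ih =>
    by_cases hc : pvCaret s
    · simp only [pvAnch, hc, if_true, List.map_eq_nil_iff] at h
      simp [hc, ih h]
    · simp [pvAnch, hc] at h

theorem pvAnch_nil_grp (r : List String) (h : pvAnch r = []) : pvGrp r = [] := by
  induction r with
  | nil => rfl
  | cons s t ih =>
    by_cases hc : pvCaret s
    · simp only [pvAnch, hc, if_true, List.map_eq_nil_iff] at h
      simp [pvGrp, hc, ih h]
    · simp [pvAnch, hc] at h

theorem pvAnch_cons_take (r : List String) (i : Nat) (l : List Nat)
    (h : pvAnch r = i :: l) : r.take i = r.takeWhile pvCaret := by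
  induction r generalizing i l with
  | nil => simp [pvAnch] at h
  | cons s t ih =>
    by_cases hc : pvCaret s
    · simp only [pvAnch, hc, if_true] at h
      cases ht : pvAnch t with
      | nil => rw [ht] at h; simp at h
      | cons i' l' =>
        rw [ht] at h
        simp only [List.map_cons, List.cons.injEq] at h
        obtain ⟨hi, -⟩ := h
        subst hi
        simp [hc, ih _ _ ht]
    · simp only [pvAnch, hc] at h
      obtain ⟨hi, -⟩ := List.cons.injEq .. |>.mp h
      subst hi
      simp [hc]

theorem pvShift (s : String) (r : List String) (a : List Nat) :
    ((a.map (· + 1)).zip ((a.map (· + 1)).tail ++ [r.length + 1])).map (pvF (s :: r)) =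
      (a.zip (a.tail ++ [r.length])).map (pvF r) := by
  have htail : (a.map (· + 1)).tail = a.tail.map (· + 1) := by
    cases a <;> simp
  have hlen : ([r.length + 1] : List Nat) = [r.length].map (· + 1) := by simp
  rw [htail, hlen, ← List.map_append, List.zip_map, List.map_map]
  refine List.map_congr_left (fun ij _ => ?_)
  obtain ⟨i, j⟩ := ij
  simp only [Function.comp, Prod.map, pvF, List.getD_cons_succ, List.drop_succ_cons]
  have harith : j + 1 - (i + 1 + 1) = j - (i + 1) := by omega
  rw [harith]

theorem pvB_grp (lines : List String) :
    ((pvAnch lines).zip ((pvAnch lines).tail ++ [lines.length])).map (pvF lines) =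
      pvGrp lines := by
  induction lines with
  | nil => simp [pvAnch, pvGrp]
  | cons s r ih =>
    by_cases hc : pvCaret s
    · simp only [pvAnch, pvGrp, List.length_cons]
      rw [if_pos hc, if_pos hc, pvShift s r (pvAnch r), ih]
    · simp only [pvAnch, pvGrp, List.length_cons]
      rw [if_neg hc, if_neg hc]
      cases ha : pvAnch r with
      | nil =>
        simp [pvF, pvAnch_nil_grp r ha, pvAnch_nil_takeWhile r ha]
      | cons i l =>
        have hshift := pvShift s r (i :: l)
        have hih := ih
        rw [ha] at hih
        simp only [List.map_cons, List.tail_cons, List.cons_append, List.zip_cons_cons] at hshift hih ⊢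
        congr 1
        · have harith : i + 1 - (0 + 1) = i := by omega
          simp only [pvF, List.getD_cons_zero, List.drop_succ_cons, List.drop_zero, harith,
            pvAnch_cons_take r i l ha]
        · exact hshift.trans hih

theorem pvAnch_eq_filterRange (lines : List String) :
    (List.range lines.length).filter (fun k => !pvCaret (lines.getD k "")) =
      pvAnch lines := by
  induction lines with
  | nil => simp [pvAnch]
  | cons s r ih =>
    rw [List.length_cons, List.range_succ_eq_map, List.filter_cons]
    by_cases hc : pvCaret s
    · simp only [pvAnch, hc, if_true]
      rw [← ih, List.filter_map]
      simp [Function.comp_def, hc, Nat.succ_eq_add_one, List.getElem?_cons_succ]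
    · simp only [pvAnch, hc]
      rw [← ih, List.filter_map]
      simp [Function.comp_def, hc, Nat.succ_eq_add_one, List.getElem?_cons_succ]

theorem pvB_anchors (lines : List String) :
    (PySem.List.pyRange 0 (lines.length : Int) 1).filter
        (fun i => !(PySem.Str.startswith (PySem.List.pyGetD lines i "") "^"))
      = (pvAnch lines).map Int.ofNat := by
  rw [PySem.List.pyRange_zero_natCast, List.filter_map]
  rw [show ((fun i => !(PySem.Str.startswith (PySem.List.pyGetD lines i "") "^")) ∘
      (fun k : Nat => ((k : Int)))) = (fun k => !pvCaret (lines.getD k "")) from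
    funext fun k => by simp [pvCaret]]
  rw [pvAnch_eq_filterRange]
  exact List.map_congr_left fun k _ => rfl

theorem pvB_record (lines : List String) :
    (let n : Int := (lines.length : Int)
     let anchors : List Int := (PySem.List.pyRange 0 n 1).filter
       (fun i => !(PySem.Str.startswith (PySem.List.pyGetD lines i "") "^"))
     let ends : List Int := PySem.List.slice anchors (some 1) none ++ [n]
     (anchors.zip ends).map (fun ij =>
       (PySem.List.pyGetD lines ij.1 "",
        (PySem.List.slice lines (some (ij.1 + 1)) (some ij.2)).map
          (fun line => (PySem.Str.slice line (some 1) none, ([] : List Int)))))) =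
      pvGrp lines := by
  simp only []
  rw [pvB_anchors, PySem.List.slice_from_one]
  have htail : ((pvAnch lines).map Int.ofNat).tail =
      (pvAnch lines).tail.map Int.ofNat := by
    cases pvAnch lines <;> simp
  have hlen : ([(lines.length : Int)] : List Int) =
      ([lines.length] : List Nat).map Int.ofNat := by simp
  rw [htail, hlen, ← List.map_append, List.zip_map, List.map_map]
  rw [← pvB_grp]
  refine List.map_congr_left (fun ij _ => ?_)
  obtain ⟨i, j⟩ := ij
  simp only [Function.comp, Prod.map, pvF]
  have hci : (Int.ofNat i) = ((i : Nat) : Int) := rfl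
  have hcj : (Int.ofNat j) = ((j : Nat) : Int) := rfl
  rw [hci, hcj]
  have hcast : ((i : Nat) : Int) + 1 = (((i + 1 : Nat) : Nat) : Int) := by push_cast; ring
  rw [hcast, PySem.List.slice_natCast]
  have hattr : (fun line => (PySem.Str.slice line (some 1) none, ([] : List Int))) = pvAttr :=
    rfl
  simp [hattr]

-- ===== VERDICT (by name: the statement is the Claim_ definition above) =====
theorem consolidate_attributes_spec : Claim_equal_consolidate_attributes := by
  intro records _
  unfold Spec_consolidate_attributes consolidate_attributes consolidate_attributes_alt
  exact List.map_congr_left (fun lines _ => (pvA_record lines).trans (pvB_record lines).symm)
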